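-- pv_equiv track=rewrite | github.com/DanielWalker13/No-Thanks | helper.py | remove_sequential_numbers
-- ===== SOURCE A (Python) =====
-- def remove_sequential_numbers(numbers):
--     """Remove sequential numbers from a list of numbers."""
--     if not numbers:
--         return [], []
--
--     non_seq_num = []
--     seq_num = []
--
--     num = 0
--     while num < len(numbers):
--         non_seq_num.append(numbers[num])
--         current_num = num  # Initialize sequence end to the current index
--
--         # Look ahead to find the end of the sequence
--         while (
--             current_num + 1 < len(numbers)
--             and numbers[current_num] + 1 == numbers[current_num + 1]
--         ):
--             current_num += 1
--
--         if num != current_num: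
--             seq_num.extend(
--                 numbers[num + 1 : current_num + 1]
--             )  # Exclude the first number of the sequence
--
--         num = current_num + 1  # Increment
--
--     return non_seq_num, seq_num
-- ===== SOURCE B (Python) =====
-- def remove_sequential_numbers(numbers):
--     """Remove sequential numbers from a list of numbers."""
--     if not numbers:
--         return [], []
--     pairs = list(zip(numbers, numbers[1:]))
--     non_seq_num = [numbers[0]] + [c for p, c in pairs if c != p + 1]
--     seq_num = [c for p, c in pairs if c == p + 1]
--     return non_seq_num, seq_num
-- ===== Notes on version B (the rewrite author's own statement) =====
-- stated objective: idiomatic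
-- what changed: Replaced the nested index-based while loops (outer loop with an inner look-ahead scan over indices) by two comprehensions over the list of adjacent pairs zip(numbers, numbers[1:]): an element is a run continuation iff it equals its predecessor plus one.
import Mathlib
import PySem

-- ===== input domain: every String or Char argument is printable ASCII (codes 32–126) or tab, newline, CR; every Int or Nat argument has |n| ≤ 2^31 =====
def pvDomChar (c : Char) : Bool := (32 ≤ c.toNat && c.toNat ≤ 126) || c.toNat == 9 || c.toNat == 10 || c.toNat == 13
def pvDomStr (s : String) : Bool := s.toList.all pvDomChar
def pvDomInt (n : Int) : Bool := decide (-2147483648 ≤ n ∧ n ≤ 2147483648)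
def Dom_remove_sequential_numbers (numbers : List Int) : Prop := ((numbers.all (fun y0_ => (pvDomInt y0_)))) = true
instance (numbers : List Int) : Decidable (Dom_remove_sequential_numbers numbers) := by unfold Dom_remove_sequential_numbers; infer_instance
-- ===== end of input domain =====

-- B replaces A's nested index-based while loops by two comprehensions over the adjacent pairs
-- zip(numbers, numbers[1:]) (objective: more idiomatic, same O(n) cost).

-- ===== PORT A =====
-- Inner while loop: advance current_num while the next element continues the run.
-- (All list indices A uses are nonnegative and guarded in range, so List.getD is exact for numbers[i].)
def rsnInner (xs : List Int) (c : Nat) : Nat :=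
  if c + 1 < xs.length ∧ xs.getD c 0 + 1 = xs.getD (c + 1) 0 then
    rsnInner xs (c + 1)
  else c
termination_by xs.length - c
decreasing_by omega

theorem rsnInner_ge (xs : List Int) (c : Nat) : c ≤ rsnInner xs c := by
  fun_induction rsnInner xs c <;> omega

-- Outer while loop over num, carrying the two accumulator lists.
def rsnOuter (xs : List Int) (num : Nat) (nonSeq seqNum : List Int) : List Int × List Int :=
  if h : num < xs.length then
    let nonSeq' := nonSeq ++ [xs.getD num 0]
    let c := rsnInner xs num
    let seqNum' := if num ≠ c then seqNum ++ PySem.List.slice xs (some ((num : Int) + 1)) (some ((c : Int) + 1)) else seqNum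
    rsnOuter xs (c + 1) nonSeq' seqNum'
  else (nonSeq, seqNum)
termination_by xs.length - num
decreasing_by have := rsnInner_ge xs num; omega

def remove_sequential_numbers (numbers : List Int) : List Int × List Int :=
  if numbers = [] then ([], [])
  else rsnOuter numbers 0 [] []

-- ===== PORT B =====
def remove_sequential_numbers_alt (numbers : List Int) : List Int × List Int :=
  match numbers with
  | [] => ([], [])
  | x :: rest =>
    let pairs := (x :: rest).zip rest
    (x :: (pairs.filter (fun q => !(q.2 == q.1 + 1))).map Prod.snd,
     (pairs.filter (fun q => q.2 == q.1 + 1)).map Prod.snd)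

-- ===== PRECONDITION & SPEC =====
def Spec_remove_sequential_numbers (numbers : List Int) (out : List Int × List Int) : Prop := out = remove_sequential_numbers_alt numbers
instance (numbers : List Int) (out : List Int × List Int) : Decidable (Spec_remove_sequential_numbers numbers out) := by unfold Spec_remove_sequential_numbers; infer_instance

-- ===== CLAIM (what is proved, stated in full; the proofs are below) =====
def Claim_equal_remove_sequential_numbers : Prop := ∀ (numbers : List Int), Dom_remove_sequential_numbers numbers → Spec_remove_sequential_numbers numbers (remove_sequential_numbers numbers)

-- ===== LEMMAS AND PROOFS =====

-- reference recursion: process the tail with the previous element as state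
def rsnH (p : Int) : List Int → List Int × List Int
  | [] => ([], [])
  | x :: rest =>
      let r := rsnH x rest
      if x = p + 1 then (r.1, x :: r.2) else (x :: r.1, r.2)

def rsnF : List Int → List Int × List Int
  | [] => ([], [])
  | x :: rest => (x :: (rsnH x rest).1, (rsnH x rest).2)

-- length of the maximal run continuing p at the front of the list
def rsnRun (p : Int) : List Int → Nat
  | [] => 0
  | x :: rest => if x = p + 1 then 1 + rsnRun x rest else 0

theorem rsnInner_eq (xs : List Int) (c : Nat) (hc : c < xs.length) :
    rsnInner xs c = c + rsnRun (xs.getD c 0) (xs.drop (c + 1)) := by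
  unfold rsnInner
  by_cases h1 : c + 1 < xs.length
  · have hdrop : xs.drop (c + 1) = xs.getD (c + 1) 0 :: xs.drop (c + 2) := by
      rw [List.drop_eq_getElem_cons h1, List.getD_eq_getElem xs 0 h1]
    by_cases h2 : xs.getD c 0 + 1 = xs.getD (c + 1) 0
    · rw [if_pos ⟨h1, h2⟩, rsnInner_eq xs (c + 1) h1, hdrop]
      simp only [rsnRun]
      rw [if_pos h2.symm, show c + 1 + 1 = c + 2 from rfl]
      omega
    · rw [if_neg (by tauto), hdrop]
      simp only [rsnRun]
      rw [if_neg (fun h => h2 h.symm)]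
      omega
  · rw [if_neg (by tauto)]
    have : xs.drop (c + 1) = [] := List.drop_eq_nil_of_le (by omega)
    simp [this, rsnRun]
termination_by xs.length - c
decreasing_by omega

theorem rsnH_run (rest : List Int) : ∀ (p : Int),
    rsnH p rest = ((rsnF (rest.drop (rsnRun p rest))).1,
      rest.take (rsnRun p rest) ++ (rsnF (rest.drop (rsnRun p rest))).2) := by
  induction rest with
  | nil => intro p; simp [rsnH, rsnRun, rsnF]
  | cons x rest ih =>
    intro p
    by_cases h : x = p + 1
    · have hr : rsnRun p (x :: rest) = rsnRun x rest + 1 := by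
        simp only [rsnRun, if_pos h]; omega
      rw [hr]
      simp only [List.drop_succ_cons, List.take_succ_cons]
      simp [rsnH, h, ih (p + 1)]
    · simp [rsnH, rsnRun, if_neg h, rsnF]

theorem rsnOuter_eq (xs : List Int) (num : Nat) (ns ss : List Int) :
    rsnOuter xs num ns ss = (ns ++ (rsnF (xs.drop num)).1, ss ++ (rsnF (xs.drop num)).2) := by
  unfold rsnOuter
  by_cases h : num < xs.length
  · rw [dif_pos h]
    have hge := rsnInner_ge xs num
    have hdrop : xs.drop num = xs.getD num 0 :: xs.drop (num + 1) := by
      rw [List.drop_eq_getElem_cons h, List.getD_eq_getElem xs 0 h]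
    set k := rsnRun (xs.getD num 0) (xs.drop (num + 1)) with hk
    have hinner : rsnInner xs num = num + k := rsnInner_eq xs num h
    have hslice : PySem.List.slice xs (some ((num : Int) + 1)) (some (((rsnInner xs num) : Int) + 1))
        = (xs.drop (num + 1)).take k := by
      rw [hinner]
      have : ((num : Int) + 1) = ((num + 1 : Nat) : Int) := by push_cast; ring
      rw [this]
      have : (((num + k : Nat) : Int) + 1) = ((num + 1 : Nat) : Int) + ((k : Nat) : Int) := by
        push_cast; ring
      rw [this, PySem.List.slice_natCast_add]
    have hrec := rsnOuter_eq xs (rsnInner xs num + 1) (ns ++ [xs.getD num 0])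
      (if num ≠ rsnInner xs num then ss ++ PySem.List.slice xs (some ((num : Int) + 1)) (some (((rsnInner xs num) : Int) + 1)) else ss)
    rw [hrec]
    have hdrop2 : xs.drop (rsnInner xs num + 1) = (xs.drop (num + 1)).drop k := by
      rw [hinner, List.drop_drop]; congr 1; omega
    rw [hdrop2, hdrop]
    show (ns ++ [xs.getD num 0] ++ _, _) = _
    rw [show rsnF (xs.getD num 0 :: xs.drop (num + 1)) =
        (xs.getD num 0 :: (rsnH (xs.getD num 0) (xs.drop (num + 1))).1,
         (rsnH (xs.getD num 0) (xs.drop (num + 1))).2) from rfl]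
    rw [rsnH_run (xs.drop (num + 1)) (xs.getD num 0), ← hk]
    by_cases hzk : num ≠ rsnInner xs num
    · rw [if_pos hzk, hslice]
      simp
    · rw [if_neg hzk]
      have : k = 0 := by omega
      simp [this]
  · rw [dif_neg h]
    have : xs.drop num = [] := List.drop_eq_nil_of_le (by omega)
    simp [this, rsnF]
termination_by xs.length - num
decreasing_by have := rsnInner_ge xs num; omega

theorem rsnZip_filter (rest : List Int) : ∀ (p : Int),
    ((((p :: rest).zip rest).filter (fun q => !(q.2 == q.1 + 1))).map Prod.snd = (rsnH p rest).1) ∧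
    ((((p :: rest).zip rest).filter (fun q => q.2 == q.1 + 1)).map Prod.snd = (rsnH p rest).2) := by
  induction rest with
  | nil => intro p; simp [rsnH]
  | cons x rest ih =>
    intro p
    by_cases h : x = p + 1
    · subst h
      obtain ⟨ih1, ih2⟩ := ih (p + 1)
      simp [List.zip_cons_cons, rsnH, ih1, ih2]
    · obtain ⟨ih1, ih2⟩ := ih x
      simp [List.zip_cons_cons, rsnH, h, ih1, ih2]

-- ===== VERDICT (by name: the statement is the Claim_ definition above) =====
theorem remove_sequential_numbers_spec : Claim_equal_remove_sequential_numbers := by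
  intro numbers _
  unfold Spec_remove_sequential_numbers
  cases numbers with
  | nil => rfl
  | cons x rest =>
    show remove_sequential_numbers (x :: rest) = _
    unfold remove_sequential_numbers
    rw [if_neg (by simp)]
    rw [rsnOuter_eq]
    simp only [List.drop_zero, List.nil_append]
    obtain ⟨h1, h2⟩ := rsnZip_filter rest x
    show rsnF (x :: rest) = _
    simp only [rsnF, remove_sequential_numbers_alt, h1, h2]
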